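-- pv_equiv track=rewrite | github.com/hrtejada/farfallino | src/farfallino.py | buscador_silabas
-- ===== SOURCE A (Python) =====
-- def buscador_silabas(palabra):
--     vocales = ['a', 'e', 'i', 'o', 'u']
--     palabra_long = len(palabra)
--     posiciones_silabas = []
--     for i in range(palabra_long):
--         caracter = palabra[i]
--         siguiente_caracter = palabra[i+1] if i+1 < palabra_long else None
--         if (caracter in vocales) and not (siguiente_caracter in vocales):
--             posiciones_silabas.append(i)
--     return posiciones_silabas
-- ===== SOURCE B (Python) =====
-- def buscador_silabas(palabra):
--     # Run-based scan: walk the word; on hitting a vowel, skip to the end of the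
--     # consecutive vowel run and record only that last index.
--     vocales = ['a', 'e', 'i', 'o', 'u']
--     posiciones_silabas = []
--     n = len(palabra)
--     i = 0
--     while i < n:
--         if palabra[i] in vocales:
--             j = i
--             while j + 1 < n and palabra[j + 1] in vocales:
--                 j += 1
--             posiciones_silabas.append(j)
--             i = j + 1
--         else:
--             i += 1
--     return posiciones_silabas
-- ===== Notes on version B (the rewrite author's own statement) =====
-- stated objective: alternative
-- what changed: Replaces A's per-index lookahead over range(len) with a run-based scan: an outer while loop that, on reaching a vowel, skips an inner loop to the end of the consecutive vowel run and records only that run's last index.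
import Mathlib
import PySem

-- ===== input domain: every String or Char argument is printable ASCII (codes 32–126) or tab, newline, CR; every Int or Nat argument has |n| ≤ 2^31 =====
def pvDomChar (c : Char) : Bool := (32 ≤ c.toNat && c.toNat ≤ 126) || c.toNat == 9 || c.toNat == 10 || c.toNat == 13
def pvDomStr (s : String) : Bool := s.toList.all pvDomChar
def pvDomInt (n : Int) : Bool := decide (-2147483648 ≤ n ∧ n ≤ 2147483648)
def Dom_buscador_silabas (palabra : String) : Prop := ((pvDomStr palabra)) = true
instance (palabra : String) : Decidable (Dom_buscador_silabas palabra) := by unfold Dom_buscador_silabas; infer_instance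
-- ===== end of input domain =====

-- B is an alternative, run-based scan (skip each consecutive vowel run, keep its last index);
-- same result as A's per-index lookahead, proved equal on all inputs.

-- ===== PORT A =====
-- literal port of A's index loop; pyGetD is used because i (and i+1 when taken) are always in range
def buscador_silabas (palabra : String) : List Int :=
  let vocales : List Char := ['a', 'e', 'i', 'o', 'u']
  let palabra_long : Int := PySem.Str.len palabra
  (PySem.List.pyRange 0 palabra_long 1).foldl
    (fun posiciones_silabas i =>
      let caracter : Char := PySem.List.pyGetD palabra.toList i ' '
      let siguiente_caracter : Option Char :=
        if i + 1 < palabra_long then some (PySem.List.pyGetD palabra.toList (i + 1) ' ') else none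
      if decide (caracter ∈ vocales) &&
          !(match siguiente_caracter with
            | some c => decide (c ∈ vocales)
            | none => false) then
        posiciones_silabas ++ [i]
      else posiciones_silabas) []

-- ===== PORT B =====
def pvVocales : List Char := ['a', 'e', 'i', 'o', 'u']

-- inner while loop: advance j past the current vowel run, returning the run's last index and the rest
def pvSkip : List Char → Int → Int × List Char
  | [], j => (j, [])
  | c :: rest, j => if decide (c ∈ pvVocales) then pvSkip rest (j + 1) else (j, c :: rest)

theorem pvSkip_length_le (cs : List Char) (j : Int) : (pvSkip cs j).2.length ≤ cs.length := by
  induction cs generalizing j with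
  | nil => simp [pvSkip]
  | cons c rest ih =>
    simp only [pvSkip]
    split
    · exact le_trans (ih (j + 1)) (by simp)
    · simp

-- outer while loop
def pvGo : List Char → Int → List Int
  | [], _ => []
  | c :: rest, i =>
    if decide (c ∈ pvVocales) then
      let p := pvSkip rest i
      p.1 :: pvGo p.2 (p.1 + 1)
    else pvGo rest (i + 1)
  termination_by cs _ => cs.length
  decreasing_by
    · exact Nat.lt_succ_of_le (pvSkip_length_le rest i)
    · simp

def buscador_silabas_alt (palabra : String) : List Int :=
  pvGo palabra.toList 0

-- ===== PRECONDITION & SPEC =====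
def Spec_buscador_silabas (palabra : String) (out : List Int) : Prop := out = buscador_silabas_alt palabra
instance (palabra : String) (out : List Int) : Decidable (Spec_buscador_silabas palabra out) := by unfold Spec_buscador_silabas; infer_instance

-- ===== CLAIM (what is proved, stated in full; the proofs are below) =====
def Claim_equal_buscador_silabas : Prop := ∀ (palabra : String), Dom_buscador_silabas palabra → Spec_buscador_silabas palabra (buscador_silabas palabra)

-- ===== LEMMAS AND PROOFS =====

-- common specification: a vowel whose successor (if any) is not a vowel contributes its index
def pvNextVow : List Char → Bool
  | [] => false
  | d :: _ => decide (d ∈ pvVocales)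

def pvSpecF : List Char → Int → List Int
  | [], _ => []
  | c :: rest, i => (if decide (c ∈ pvVocales) && !pvNextVow rest then [i] else []) ++ pvSpecF rest (i + 1)

theorem pvSkip_specF (rest : List Char) (i : Int) :
    (pvSkip rest i).1 :: pvSpecF (pvSkip rest i).2 ((pvSkip rest i).1 + 1)
      = (if pvNextVow rest then [] else [i]) ++ pvSpecF rest (i + 1) := by
  induction rest generalizing i with
  | nil => simp [pvSkip, pvNextVow, pvSpecF]
  | cons d r ih =>
    by_cases hd : d ∈ pvVocales
    · simp only [pvSkip, pvNextVow, pvSpecF, hd, decide_true, if_true, List.nil_append]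
      rw [ih (i + 1)]
      cases r with
      | nil => simp [pvNextVow]
      | cons e r' => by_cases he : e ∈ pvVocales <;> simp [pvNextVow, he]
    · simp [pvSkip, pvNextVow, pvSpecF, hd]

theorem pvGo_eq_specF (cs : List Char) (i : Int) : pvGo cs i = pvSpecF cs i := by
  fun_induction pvGo cs i with
  | case1 => simp [pvSpecF]
  | case2 c rest i hv p ih =>
    rw [pvGo.eq_def, ← pvGo.eq_def]
    rw [ih, pvSkip_specF, pvSpecF]
    cases h : pvNextVow rest <;> simp [hv]
  | case3 c rest i hv ih =>
    rw [pvSpecF, ih]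
    simp [hv]

theorem foldA (full : List Char) (m k : Nat) (hm : m = full.length - k) (acc : List Int) :
    (PySem.List.pyRange (k : Int) (full.length : Int) 1).foldl
      (fun posiciones_silabas i =>
        if (decide (PySem.List.pyGetD full i ' ' ∈ ['a', 'e', 'i', 'o', 'u']) &&
            !(match (if i + 1 < (full.length : Int)
                then some (PySem.List.pyGetD full (i + 1) ' ') else none) with
              | some c => decide (c ∈ ['a', 'e', 'i', 'o', 'u'])
              | none => false)) = true then
          posiciones_silabas ++ [i]
        else posiciones_silabas) acc
      = acc ++ pvSpecF (full.drop k) (k : Int) := by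
  induction m generalizing k acc with
  | zero =>
    have hk : full.length ≤ k := by omega
    rw [PySem.List.pyRange_one_eq_nil (by exact_mod_cast hk), List.drop_eq_nil_of_le hk]
    simp [pvSpecF]
  | succ m ih =>
    have hk : k < full.length := by omega
    rw [PySem.List.pyRange_one_cons (by exact_mod_cast hk), List.foldl_cons]
    have hcast : (k : Int) + 1 = ((k + 1 : Nat) : Int) := by push_cast; ring
    rw [hcast, ih (k + 1) (by omega)]
    have hdrop : full.drop k = full[k] :: full.drop (k + 1) := List.drop_eq_getElem_cons hk
    have hget : PySem.List.pyGetD full (k : Int) ' ' = full[k] := by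
      rw [PySem.List.pyGetD_natCast]; exact List.getD_eq_getElem full ' ' hk
    have hmatch : (match (if ((k + 1 : Nat) : Int) < (full.length : Int)
          then some (PySem.List.pyGetD full ((k + 1 : Nat) : Int) ' ') else none) with
        | some c => decide (c ∈ ['a', 'e', 'i', 'o', 'u'])
        | none => false) = pvNextVow (full.drop (k + 1)) := by
      by_cases h1 : k + 1 < full.length
      · rw [if_pos (by exact_mod_cast h1), PySem.List.pyGetD_natCast,
          List.getD_eq_getElem full ' ' h1, List.drop_eq_getElem_cons h1]
        simp [pvNextVow, pvVocales]
      · rw [if_neg (by exact_mod_cast h1), List.drop_eq_nil_of_le (by omega)]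
        simp [pvNextVow]
    rw [hdrop, pvSpecF, hget, hmatch]
    simp only [pvVocales]
    split <;> rename_i hc
    · simp only [hcast, List.append_assoc]
      split <;> rename_i h2
      · rfl
      · exact absurd hc h2
    · simp only [hcast]
      split <;> rename_i h2
      · exact absurd h2 hc
      · simp

-- ===== VERDICT (by name: the statement is the Claim_ definition above) =====
theorem buscador_silabas_spec : Claim_equal_buscador_silabas := by
  intro palabra _
  unfold Spec_buscador_silabas buscador_silabas buscador_silabas_alt
  rw [pvGo_eq_specF]
  simp only [PySem.Str.len_eq]
  have h := foldA palabra.toList (palabra.toList.length) 0 (by omega) []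
  simp only [List.drop_zero, List.nil_append] at h
  exact h
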